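-- pv_equiv track=rewrite | github.com/en9er/hamming-code | hamming.py | remove_control_bits
-- ===== SOURCE A (Python) =====
-- def is_power_of_two(num):
--     return num and (not (num & (num - 1)))
--
-- def remove_control_bits(num):
--     res = 0
--     pos = num.bit_length()
--     mask = pow(2, pos - 1)
--     while pos:
--         if not is_power_of_two(pos):
--             res = res | (num & mask)
--         else:
--             res >>= 1
--         mask >>= 1
--         pos -= 1
--     return res
-- ===== SOURCE B (Python) =====
-- def is_power_of_two(num):
--     return num and (not (num & (num - 1)))
--
-- def remove_control_bits(num):
--     # collect data bits low-to-high, then pack them at fresh output indices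
--     bits = [(num >> (pos - 1)) & 1
--             for pos in range(1, num.bit_length() + 1)
--             if not is_power_of_two(pos)]
--     return sum(bit << i for i, bit in enumerate(bits))
-- ===== Notes on version B (the rewrite author's own statement) =====
-- stated objective: alternative
-- what changed: A mixes extraction and packing in one high-to-low loop whose accumulator is alternately OR-ed with 'num & mask' and shifted right at control positions; B first collects the data-bit values into a list (low-to-high, skipping power-of-two positions) and then packs them in a second pass at explicit fresh output indices via sum(bit << i).
import Mathlib
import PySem

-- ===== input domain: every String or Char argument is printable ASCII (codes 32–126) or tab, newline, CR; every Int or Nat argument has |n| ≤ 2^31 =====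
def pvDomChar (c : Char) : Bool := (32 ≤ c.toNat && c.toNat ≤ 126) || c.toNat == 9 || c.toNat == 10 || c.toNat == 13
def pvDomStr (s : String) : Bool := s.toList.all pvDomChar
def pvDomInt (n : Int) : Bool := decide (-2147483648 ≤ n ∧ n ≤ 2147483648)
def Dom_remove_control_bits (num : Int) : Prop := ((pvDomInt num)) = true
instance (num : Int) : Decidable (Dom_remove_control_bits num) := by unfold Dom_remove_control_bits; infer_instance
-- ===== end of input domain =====

-- B re-implements A as a two-phase collect-then-pack (gather the data bits into a list,
-- then sum them shifted to fresh output indices) instead of A's single interleaved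
-- shift-right/OR accumulator loop; same value for every int, including 0 and negatives.

-- ===== PORT A =====
def is_power_of_two (num : Int) : Bool :=
  -- 'num and (not (num & (num - 1)))' used as a boolean condition
  (!(num == 0)) && (PySem.Int.band num (num - 1) == 0)

-- the while-loop of A, structural recursion on pos
def rcbLoop (num : Int) : Nat → Int → Int → Int
  | 0, _, res => res
  | pos + 1, mask, res =>
    if !is_power_of_two ((pos : Int) + 1) then
      rcbLoop num pos (mask >>> (1 : Nat)) (PySem.Int.bor res (PySem.Int.band num mask))
    else
      rcbLoop num pos (mask >>> (1 : Nat)) (res >>> (1 : Nat))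

def remove_control_bits (num : Int) : Int :=
  let pos := PySem.Int.bitLength num
  -- pow(2, pos - 1); when num = 0 Python builds the float 0.5 here, but the loop
  -- body never runs then, so the mask value is unused (we use Nat subtraction)
  let mask : Int := 2 ^ (pos - 1)
  rcbLoop num pos mask 0

-- ===== PORT B =====
def remove_control_bits_alt (num : Int) : Int :=
  let bits : List Int :=
    ((PySem.List.pyRange 1 ((PySem.Int.bitLength num : Int) + 1)).filter
        (fun p => !is_power_of_two p)).map
      (fun p => PySem.Int.band (num >>> (p - 1).toNat) 1)
  -- sum(bit << i for i, bit in enumerate(bits)); the enumerate index is ≥ 0, so .toNat is exact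
  (PySem.List.enumerate bits 0).foldl (fun acc ib => acc + (ib.2 <<< ib.1.toNat)) 0

-- ===== PRECONDITION & SPEC =====
def Spec_remove_control_bits (num : Int) (out : Int) : Prop := out = remove_control_bits_alt num
instance (num : Int) (out : Int) : Decidable (Spec_remove_control_bits num out) := by unfold Spec_remove_control_bits; infer_instance

-- ===== CLAIM (what is proved, stated in full; the proofs are below) =====
def Claim_equal_remove_control_bits : Prop := ∀ (num : Int), Dom_remove_control_bits num → Spec_remove_control_bits num (remove_control_bits num)

-- ===== LEMMAS AND PROOFS =====

-- bit k of num in Python's infinite two's complement, as B extracts it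
def bitI (num : Int) (k : Nat) : Int := PySem.Int.band (num >>> k) 1

-- number of control positions (powers of two) among 1..pos
def cc : Nat → Nat
  | 0 => 0
  | p + 1 => cc p + (if is_power_of_two ((p : Int) + 1) then 1 else 0)

-- the packed data bits of positions 1..pos (the common value both programs compute)
def packP (num : Int) : Nat → Int
  | 0 => 0
  | p + 1 => packP num p + (if is_power_of_two ((p : Int) + 1) then 0 else bitI num p * 2 ^ (p - cc p))

-- the data bits of positions 1..L, as B collects them
def bitsL (num : Int) (L : Nat) : List Int :=
  ((PySem.List.pyRange 1 ((L : Int) + 1)).filter (fun p => !is_power_of_two p)).map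
    (fun p => PySem.Int.band (num >>> (p - 1).toNat) 1)

lemma cc_le (p : Nat) : cc p ≤ p := by
  induction p with
  | zero => simp [cc]
  | succ p ih => simp only [cc]; split <;> omega

lemma bitI_zero_or_one (num : Int) (k : Nat) : bitI num k = 0 ∨ bitI num k = 1 := by
  rw [bitI, PySem.Int.band_one]
  have h1 := PySem.Int.mod_nonneg (num >>> k) (b := 2) (by norm_num)
  have h2 := PySem.Int.mod_lt (num >>> k) (b := 2) (by norm_num)
  omega

lemma band_two_pow_nonneg (n k : Nat) :
    PySem.Int.band (n : Int) ((2 : Int) ^ k) = bitI (n : Int) k * 2 ^ k := by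
  have hp : ((2:Int) ^ k) = ((2 ^ k : Nat) : Int) := by push_cast; ring
  rw [hp, bitI, ← Int.natCast_shiftRight, PySem.Int.band_natCast,
    show (1:Int) = ((1:Nat):Int) from rfl, PySem.Int.band_natCast,
    Nat.and_two_pow, Nat.and_one_is_mod, Nat.shiftRight_eq_div_pow,
    Nat.testBit_eq_decide_div_mod_eq]
  have := Nat.mod_lt (n / 2 ^ k) (y := 2) (by norm_num)
  by_cases hb : n / 2 ^ k % 2 = 1 <;> simp [hb]
  have h0 : n / 2 ^ k % 2 = 0 := by omega
  rw [hp, ← Int.natCast_div]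
  exact_mod_cast Nat.dvd_of_mod_eq_zero h0

lemma band_two_pow_neg (m k : Nat) :
    PySem.Int.band (Int.negSucc m) ((2:Int) ^ k) = bitI (Int.negSucc m) k * 2 ^ k := by
  have hp : ((2:Int) ^ k) = ((2 ^ k : Nat) : Int) := by push_cast; ring
  have hband : PySem.Int.band (Int.negSucc m) ((2:Int) ^ k) = ((2 ^ k - (2 ^ k &&& m) : Nat) : Int) := by
    rw [hp]
    simp [PySem.Int.band, Int.negSucc_eq]
    rw [if_neg (by omega)]
    have h2 : ((2:Int) ^ k).toNat = 2 ^ k := by rw [hp]; exact Int.toNat_natCast _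
    rw [h2]
  have hbit : bitI (Int.negSucc m) k = ((-(((m >>> k : Nat)):Int) - 1) % 2) := by
    rw [bitI, show (Int.negSucc m) >>> k = Int.negSucc (m >>> k) from rfl,
      PySem.Int.band_one, PySem.Int.mod_eq_emod_of_pos (by norm_num), Int.negSucc_eq]
    ring_nf
  rw [hband, hbit, hp, Nat.two_pow_and, Nat.testBit_eq_decide_div_mod_eq,
    Nat.shiftRight_eq_div_pow]
  by_cases hb : m / 2 ^ k % 2 = 1
  · simp [hb]
    rw [hp, ← Int.natCast_div]; omega
  · have h0 : m / 2 ^ k % 2 = 0 := by omega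
    simp [hb]
    rw [hp, ← Int.natCast_div]; omega

-- A's extraction 'num & mask' equals B's bit shifted back up
lemma band_two_pow (num : Int) (k : Nat) :
    PySem.Int.band num ((2 : Int) ^ k) = bitI num k * 2 ^ k := by
  rcases le_or_gt 0 num with h | h
  · obtain ⟨n, rfl⟩ := Int.eq_ofNat_of_zero_le h
    exact band_two_pow_nonneg n k
  · obtain ⟨m, rfl⟩ : ∃ m : Nat, num = Int.negSucc m :=
      ⟨(-num - 1).toNat, by rw [Int.negSucc_eq]; omega⟩
    exact band_two_pow_neg m k

lemma nat_lor_pack (k a : Nat) : (2 ^ (k + 1) * a) ||| 2 ^ k = 2 ^ (k + 1) * a + 2 ^ k := by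
  apply Nat.eq_of_testBit_eq
  intro j
  rw [Nat.testBit_lor]
  rw [show (2:Nat) ^ (k+1) * a + 2 ^ k = 2 ^ (k+1) * a + 2 ^ k from rfl,
      Nat.testBit_two_pow_mul_add a (Nat.pow_lt_pow_succ (by norm_num)) j]
  rw [show (2:Nat) ^ (k+1) * a = 2 ^ (k+1) * a + 0 by omega,
      Nat.testBit_two_pow_mul_add a (by positivity) j]
  by_cases hj : j < k + 1 <;> simp [hj, Nat.testBit_two_pow]
  · omega

lemma natCast_shiftRight_one (x : Nat) : ((x : Int) >>> (1 : Nat)) = ((x >>> 1 : Nat) : Int) :=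
  (Int.natCast_shiftRight x 1).symm

-- the loop invariant for A: res holds the already-packed higher bits, 2^pos-aligned
lemma rcbLoop_eq (num : Int) : ∀ (pos : Nat) (mask : Int) (rn : Nat),
    (pos ≠ 0 → mask = 2 ^ (pos - 1)) →
    rcbLoop num pos mask ((2 ^ pos * rn : Nat) : Int)
      = ((2 ^ (pos - cc pos) * rn : Nat) : Int) + packP num pos := by
  intro pos
  induction pos with
  | zero => intro mask rn _; simp [rcbLoop, cc, packP]
  | succ pos ih =>
    intro mask rn hmask
    have hm : mask = 2 ^ pos := by simpa using hmask (by omega)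
    have hmsh : pos ≠ 0 → mask >>> (1 : Nat) = 2 ^ (pos - 1) := by
      intro hp0
      rw [hm, show ((2:Int) ^ pos) = ((2 ^ pos : Nat) : Int) by push_cast; ring,
        natCast_shiftRight_one, Nat.shiftRight_eq_div_pow]
      have : 2 ^ pos / 2 ^ 1 = 2 ^ (pos - 1) := by
        rw [Nat.pow_div (by omega) (by norm_num)]
      rw [this]; push_cast; ring
    have hcle := cc_le pos
    rw [rcbLoop]
    by_cases hpw : is_power_of_two ((pos : Int) + 1)
    · -- control position: res >>= 1
      simp only [hpw, Bool.not_true, Bool.false_eq_true, if_false]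
      have hres : (((2 ^ (pos + 1) * rn : Nat) : Int)) >>> (1 : Nat) = ((2 ^ pos * rn : Nat) : Int) := by
        rw [natCast_shiftRight_one, Nat.shiftRight_eq_div_pow]
        congr 1
        rw [pow_succ, Nat.mul_comm (2 ^ pos) 2, Nat.mul_assoc]
        omega
      rw [hres, ih (mask >>> (1 : Nat)) rn hmsh]
      have hc : cc (pos + 1) = cc pos + 1 := by simp [cc, hpw]
      have hpk : packP num (pos + 1) = packP num pos := by simp [packP, hpw]
      rw [hc, hpk, show pos + 1 - (cc pos + 1) = pos - cc pos by omega]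
    · -- data position: res |= num & mask
      simp only [hpw, Bool.not_false, if_true]
      subst hm
      rw [band_two_pow]
      have hc1 : cc (pos + 1) = cc pos := by simp [cc, hpw]
      have hpk : packP num (pos + 1) = packP num pos + bitI num pos * 2 ^ (pos - cc pos) := by
        simp [packP, hpw]
      rcases bitI_zero_or_one num pos with hb | hb
      · rw [hb, zero_mul, PySem.Int.bor_zero,
          show ((2 ^ (pos + 1) * rn : Nat) : Int) = ((2 ^ pos * (2 * rn) : Nat) : Int) by
            congr 1; rw [pow_succ]; ring,
          ih ((2:Int) ^ pos >>> (1 : Nat)) (2 * rn) hmsh, hpk, hb, zero_mul, add_zero, hc1]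
        congr 2
        have : pos + 1 - cc pos = (pos - cc pos) + 1 := by omega
        rw [this, pow_succ]; ring
      · rw [hb,
          show (1:Int) * 2 ^ pos = ((2 ^ pos : Nat) : Int) by push_cast; ring,
          PySem.Int.bor_natCast, nat_lor_pack,
          show (2 ^ (pos + 1) * rn + 2 ^ pos : Nat) = 2 ^ pos * (2 * rn + 1) by rw [pow_succ]; ring,
          ih ((2:Int) ^ pos >>> (1 : Nat)) (2 * rn + 1) hmsh, hpk, hb, one_mul, hc1]
        have : pos + 1 - cc pos = (pos - cc pos) + 1 := by omega
        rw [this, pow_succ]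
        push_cast; ring

lemma remove_control_bits_eq_packP (num : Int) :
    remove_control_bits num = packP num (PySem.Int.bitLength num) := by
  rw [remove_control_bits]
  have h := rcbLoop_eq num (PySem.Int.bitLength num) (2 ^ (PySem.Int.bitLength num - 1)) 0
    (fun _ => rfl)
  simpa using h

lemma bitsL_zero (num : Int) : bitsL num 0 = [] := by
  rw [bitsL, PySem.List.pyRange_one_eq_nil (by norm_num)]
  rfl

lemma bitsL_succ (num : Int) (L : Nat) :
    bitsL num (L + 1)
      = bitsL num L ++ (if is_power_of_two ((L : Int) + 1) then [] else [bitI num L]) := by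
  rw [bitsL, bitsL,
    show (((L + 1 : Nat) : Int) + 1) = (((L : Int) + 1) + 1) by push_cast; ring,
    PySem.List.pyRange_one_succ_right (by omega),
    List.filter_append, List.map_append]
  congr 1
  by_cases hpw : is_power_of_two ((L : Int) + 1)
  · simp [hpw]
  · simp [hpw, bitI, Int.shiftRight_natCast_right]

lemma length_bitsL (num : Int) (L : Nat) : (bitsL num L).length = L - cc L := by
  induction L with
  | zero => rw [bitsL_zero]; rfl
  | succ L ih =>
    have hcle := cc_le L
    rw [bitsL_succ, List.length_append, ih]
    by_cases hpw : is_power_of_two ((L : Int) + 1)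
    · simp [cc, hpw]
    · simp [cc, hpw]
      omega

lemma enum_foldl_eq_packP (num : Int) (L : Nat) :
    (PySem.List.enumerate (bitsL num L) 0).foldl (fun acc ib => acc + (ib.2 <<< ib.1.toNat)) 0
      = packP num L := by
  induction L with
  | zero => rw [bitsL_zero]; rfl
  | succ L ih =>
    have hcle := cc_le L
    rw [bitsL_succ]
    by_cases hpw : is_power_of_two ((L : Int) + 1)
    · simp [hpw, ih, packP]
    · simp only [hpw, if_neg (by simp : ¬(false = true))]
      rw [PySem.List.enumerate_append, List.foldl_append, ih]
      show packP num L + bitI num L <<< ((0 : Int) + ((bitsL num L).length : Int)).toNat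
        = packP num (L + 1)
      rw [zero_add, Int.toNat_natCast, length_bitsL, Int.shiftLeft_eq]
      simp [packP, hpw]

lemma alt_eq_packP (num : Int) :
    remove_control_bits_alt num = packP num (PySem.Int.bitLength num) := by
  rw [show remove_control_bits_alt num
      = (PySem.List.enumerate (bitsL num (PySem.Int.bitLength num)) 0).foldl
          (fun acc ib => acc + (ib.2 <<< ib.1.toNat)) 0 from rfl,
    enum_foldl_eq_packP]

-- ===== VERDICT (by name: the statement is the Claim_ definition above) =====
theorem remove_control_bits_spec : Claim_equal_remove_control_bits := by
  intro num _
  unfold Spec_remove_control_bits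
  rw [remove_control_bits_eq_packP, alt_eq_packP]
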